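-- pv_equiv track=rewrite | github.com/nixxholas/IS111-rekt | LabTest/Lab Test 1 (AY2018-19 T1)/your_email_id/q3.py | mask_out
-- ===== SOURCE A (Python) =====
-- def mask_out(sentence, banned, substitutes):
--     # write your answer between #start and #end
--     c_arr = list(sentence)
--     subs = list(substitutes)
--     sub_it = 0
--
--     for i in range(0, len(c_arr)):
--         if c_arr[i] in banned:
--             if len(subs) <= 1:
--                 c_arr[i] = subs[0]
--             else:
--                 c_arr[i] = subs[sub_it]
--                 if sub_it + 1 < len(subs): sub_it += 1
--                 else: sub_it = 0
--
--     return "".join(c_arr)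
-- ===== SOURCE B (Python) =====
-- def mask_out(sentence, banned, substitutes):
--     # Split the sentence into maximal banned-free segments, then rejoin the
--     # segments with a replacement string made by tiling `substitutes` and
--     # slicing it to the number of gaps.
--     bset = set(banned)
--     segs = []
--     cur = ""
--     for ch in sentence:
--         if ch in bset:
--             segs.append(cur)
--             cur = ""
--         else:
--             cur += ch
--     segs.append(cur)
--     m = len(segs) - 1
--     if m == 0:
--         return segs[0]
--     fills = (substitutes * (m // len(substitutes) + 1))[:m]
--     return segs[0] + "".join(f + s for f, s in zip(fills, segs[1:]))
-- ===== Notes on version B (the rewrite author's own statement) =====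
-- stated objective: alternative
-- what changed: A walks every character with a mutable wrap-around substitute counter and overwrites in place; B splits the sentence into maximal banned-free segments, builds the replacement sequence by tiling the substitutes string and slicing it to the number of gaps, and rejoins segments with those fills.
import Mathlib
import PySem

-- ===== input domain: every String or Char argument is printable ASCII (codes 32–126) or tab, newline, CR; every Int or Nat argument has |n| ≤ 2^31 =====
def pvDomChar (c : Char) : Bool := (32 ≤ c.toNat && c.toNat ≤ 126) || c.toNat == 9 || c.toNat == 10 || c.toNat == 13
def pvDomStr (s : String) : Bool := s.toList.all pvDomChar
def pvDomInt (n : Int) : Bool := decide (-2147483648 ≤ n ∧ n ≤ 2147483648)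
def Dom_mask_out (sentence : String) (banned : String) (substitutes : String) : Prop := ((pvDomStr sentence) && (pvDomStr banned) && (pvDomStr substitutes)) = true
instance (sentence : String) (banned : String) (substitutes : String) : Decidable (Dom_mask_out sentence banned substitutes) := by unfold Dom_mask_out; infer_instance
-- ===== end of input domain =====

-- B splits the sentence into maximal banned-free segments and rejoins them with a tiled-and-sliced copy of substitutes, replacing A's per-character loop with a mutable wrap counter; same cost, different decomposition.

-- ===== PORT A =====
-- Loop "for i in range(len(c_arr))" reading/writing only index i, with state (c_arr, sub_it):
-- the obvious structural recursion over the char list carrying sub_it.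
-- Python's subs[0] / subs[sub_it] raise IndexError when subs = [] (excluded by Pre_); the port uses default ' ' there.
def maskA (ban subs : List Char) : List Char → Nat → List Char
  | [], _ => []
  | c :: rest, subIt =>
    if c ∈ ban then
      if subs.length ≤ 1 then
        subs.getD 0 ' ' :: maskA ban subs rest subIt
      else
        subs.getD subIt ' ' :: maskA ban subs rest (if subIt + 1 < subs.length then subIt + 1 else 0)
    else c :: maskA ban subs rest subIt

def mask_out (sentence : String) (banned : String) (substitutes : String) : String :=
  String.ofList (maskA banned.toList substitutes.toList sentence.toList 0)

-- ===== PORT B =====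
-- Source B's splitting loop body: state (finished segments, current segment)
def pvStep (bset : PySem.Set Char) (st : List (List Char) × List Char) (ch : Char) : List (List Char) × List Char :=
  if PySem.Set.contains bset ch then (st.1 ++ [st.2], []) else (st.1, st.2 ++ [ch])

def mask_out_alt (sentence : String) (banned : String) (substitutes : String) : String :=
  let bset := PySem.Set.ofList banned.toList
  let st := sentence.toList.foldl (pvStep bset) ([], [])
  let segs := st.1 ++ [st.2]
  let m := segs.length - 1
  if m = 0 then String.ofList (segs.headD []) else
  let subs := substitutes.toList
  -- Python's 'substitutes * (m // n + 1)' is replicate-and-flatten; the slice [:m] with 0 ≤ m is take m.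
  -- Python raises ZeroDivisionError here when subs = [] (excluded by Pre_); Nat division then yields fills = [].
  let fills := (List.replicate (m / subs.length + 1) subs).flatten.take m
  String.ofList (segs.headD [] ++ (List.zipWith (fun f s => f :: s) fills segs.tail).flatten)

-- ===== PRECONDITION & SPEC =====
-- Pre_ excludes exactly the inputs where Python A raises IndexError (B: ZeroDivisionError):
-- substitutes empty while a banned character occurs in sentence.
def Pre_mask_out (sentence : String) (banned : String) (substitutes : String) : Prop :=
  substitutes.toList ≠ [] ∨ ∀ c ∈ sentence.toList, c ∉ banned.toList
instance (sentence : String) (banned : String) (substitutes : String) : Decidable (Pre_mask_out sentence banned substitutes) := by unfold Pre_mask_out; infer_instance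

def pvWitness_mask_out : String × String × String := ("hello world", "lo", "xyz")

def Spec_mask_out (sentence : String) (banned : String) (substitutes : String) (out : String) : Prop := out = mask_out_alt sentence banned substitutes
instance (sentence : String) (banned : String) (substitutes : String) (out : String) : Decidable (Spec_mask_out sentence banned substitutes out) := by unfold Spec_mask_out; infer_instance

-- ===== CLAIM (what is proved, stated in full; the proofs are below) =====
def Claim_equal_mask_out : Prop := ∀ (sentence : String) (banned : String) (substitutes : String), Dom_mask_out sentence banned substitutes → Pre_mask_out sentence banned substitutes → Spec_mask_out sentence banned substitutes (mask_out sentence banned substitutes)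

-- ===== LEMMAS AND PROOFS =====

-- common specification: the k-th banned occurrence becomes subs[0] if |subs| ≤ 1 else subs[k % |subs|]
def pvSub (subs : List Char) (k : Nat) : Char :=
  if subs.length ≤ 1 then subs.getD 0 ' ' else subs.getD (k % subs.length) ' '

def pvSpec (ban subs : List Char) : List Char → Nat → List Char
  | [], _ => []
  | c :: rest, k => if c ∈ ban then pvSub subs k :: pvSpec ban subs rest (k + 1) else c :: pvSpec ban subs rest k

-- the segment decomposition Source B's first loop computes
def segsRec (ban : List Char) : List Char → List (List Char)
  | [] => [[]]
  | c :: rest =>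
    let s := segsRec ban rest
    if c ∈ ban then [] :: s else (c :: s.headD []) :: s.tail

lemma segsRec_ne_nil (ban cs : List Char) : segsRec ban cs ≠ [] := by
  cases cs with
  | nil => simp [segsRec]
  | cons c rest => by_cases hc : c ∈ ban <;> simp [segsRec, hc]

-- ===== A-side: maskA computes pvSpec =====
lemma maskA_le1 (ban subs : List Char) (h : subs.length ≤ 1) :
    ∀ (cs : List Char) (s k : Nat), maskA ban subs cs s = pvSpec ban subs cs k := by
  intro cs
  induction cs with
  | nil => intro s k; rfl
  | cons c rest ih =>
      intro s k
      by_cases hc : c ∈ ban <;> simp [maskA, pvSpec, pvSub, hc, h] <;> exact ih _ _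

lemma maskA_gt1 (ban subs : List Char) (h : 1 < subs.length) :
    ∀ (cs : List Char) (k : Nat), maskA ban subs cs (k % subs.length) = pvSpec ban subs cs k := by
  intro cs
  induction cs with
  | nil => intro k; rfl
  | cons c rest ih =>
      intro k
      by_cases hc : c ∈ ban
      · have hn : ¬ subs.length ≤ 1 := by omega
        have hstep : (if k % subs.length + 1 < subs.length then k % subs.length + 1 else 0)
            = (k + 1) % subs.length := by
          have hk : k % subs.length < subs.length := Nat.mod_lt _ (by omega)
          rcases lt_or_ge (k % subs.length + 1) subs.length with hlt | hge
          · rw [if_pos hlt, Nat.add_mod, Nat.mod_eq_of_lt (show 1 < subs.length from h),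
              Nat.mod_eq_of_lt hlt]
          · have : k % subs.length + 1 = subs.length := by omega
            rw [if_neg (by omega), Nat.add_mod, Nat.mod_eq_of_lt (show 1 < subs.length from h),
              this, Nat.mod_self]
        simp only [maskA, pvSpec, pvSub, if_pos hc, if_neg hn, hstep, ih]
      · simp [maskA, pvSpec, hc, ih]

lemma maskA_eq_pvSpec (ban subs cs : List Char) :
    maskA ban subs cs 0 = pvSpec ban subs cs 0 := by
  rcases Nat.lt_or_ge 1 subs.length with h | h
  · have := maskA_gt1 ban subs h cs 0
    simpa [Nat.zero_mod] using this
  · exact maskA_le1 ban subs h cs 0 0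

-- ===== B-side: the splitting fold computes segsRec =====
lemma contains_ofList (l : List Char) (c : Char) :
    PySem.Set.contains (PySem.Set.ofList l) c = decide (c ∈ l) := by
  simp [PySem.Set.contains, PySem.Set.mem_ofList]

lemma fold_segs (ban : List Char) (bset : PySem.Set Char)
    (hmem : ∀ c, PySem.Set.contains bset c = decide (c ∈ ban)) :
    ∀ (cs : List Char) (acc : List (List Char)) (cur : List Char),
      (cs.foldl (pvStep bset) (acc, cur)).1 ++ [(cs.foldl (pvStep bset) (acc, cur)).2]
        = acc ++ (cur ++ (segsRec ban cs).headD []) :: (segsRec ban cs).tail := by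
  intro cs
  induction cs with
  | nil => intro acc cur; simp [segsRec]
  | cons c rest ih =>
      intro acc cur
      cases hs : segsRec ban rest with
      | nil => exact absurd hs (segsRec_ne_nil ban rest)
      | cons h t =>
        by_cases hc : c ∈ ban
        · have : pvStep bset (acc, cur) c = (acc ++ [cur], []) := by
            simp only [pvStep, hmem c]; simp [hc]
          simp only [List.foldl_cons, this]
          rw [ih]
          simp [segsRec, hc, hs]
        · have : pvStep bset (acc, cur) c = (acc, cur ++ [c]) := by
            simp only [pvStep, hmem c]; simp [hc]
          simp only [List.foldl_cons, this]
          rw [ih]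
          simp [segsRec, hc, hs]

-- ===== common: interleaving the segments with the k-offset fills is pvSpec =====
lemma spec_segs (ban subs : List Char) :
    ∀ (cs : List Char) (k : Nat),
      pvSpec ban subs cs k
        = (segsRec ban cs).headD []
          ++ (List.zipWith (fun f s => f :: s)
                ((List.range (segsRec ban cs).tail.length).map (fun j => pvSub subs (k + j)))
                (segsRec ban cs).tail).flatten := by
  intro cs
  induction cs with
  | nil => intro k; simp [pvSpec, segsRec]
  | cons c rest ih =>
      intro k
      cases hs : segsRec ban rest with
      | nil => exact absurd hs (segsRec_ne_nil ban rest)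
      | cons h t =>
        by_cases hc : c ∈ ban
        · have hrange : (List.range (t.length + 1)).map (fun j => pvSub subs (k + j))
              = pvSub subs k :: (List.range t.length).map (fun j => pvSub subs (k + 1 + j)) := by
            rw [List.range_succ_eq_map]
            simp only [List.map_cons, List.map_map, Nat.add_zero]
            congr 1
            apply List.map_congr_left
            intro j _
            simp only [Function.comp, Nat.succ_eq_add_one]
            congr 1
            omega
          simp only [pvSpec, segsRec, hc, if_pos trivial]
          rw [ih (k + 1), hs]
          simp only [List.headD_cons, List.tail_cons, List.length_cons, hrange]
          simp [List.zipWith]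
        · simp only [pvSpec, segsRec, hc]
          rw [ih k, hs]
          simp

-- if no character of cs is banned, there is a single segment
lemma segsRec_no_ban (ban : List Char) :
    ∀ cs : List Char, (∀ c ∈ cs, c ∉ ban) → segsRec ban cs = [cs] := by
  intro cs
  induction cs with
  | nil => intro _; rfl
  | cons c rest ih =>
      intro hno
      have hc : c ∉ ban := hno c (by simp)
      rw [segsRec]
      simp only [if_neg hc, ih (fun d hd => hno d (by simp [hd]))]
      simp

-- ===== tiling: take m of flatten (replicate r subs) is the modulo fill =====
lemma map_range_getD (l : List Char) (m : Nat) (h : m ≤ l.length) :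
    (List.range m).map (fun j => l.getD j ' ') = l.take m := by
  apply List.ext_getElem
  · simp [h]
  · intro i hi _
    simp only [List.getElem_map, List.getElem_range, List.getElem_take]
    rw [List.getD_eq_getElem]

lemma take_flatten_replicate (l : List Char) (hl : l ≠ []) :
    ∀ (r m : Nat), m ≤ r * l.length →
      (List.replicate r l).flatten.take m
        = (List.range m).map (fun j => l.getD (j % l.length) ' ') := by
  intro r
  induction r with
  | zero =>
      intro m hm
      have : m = 0 := by
        have := Nat.le_zero.mp (by simpa using hm)
        omega
      simp [this]
  | succ r ih =>
      intro m hm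
      rcases Nat.le_total m l.length with hle | hle2
      · rw [List.replicate_succ, List.flatten_cons, List.take_append_of_le_length hle]
        rw [← map_range_getD l m hle]
        apply List.map_congr_left
        intro j hj
        have : j < l.length := lt_of_lt_of_le (List.mem_range.mp hj) hle
        rw [Nat.mod_eq_of_lt this]
      · have hn : 0 < l.length := List.length_pos_iff.mpr hl
        obtain ⟨m', rfl⟩ : ∃ m', m = l.length + m' := ⟨m - l.length, by omega⟩
        rw [List.replicate_succ, List.flatten_cons, List.take_append, List.range_add]
        rw [List.take_of_length_le (Nat.le_add_right _ _), Nat.add_sub_cancel_left]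
        have hm' : m' ≤ r * l.length := by
          have : l.length + m' ≤ (r + 1) * l.length := hm
          nlinarith
        rw [ih m' hm', List.map_append, List.map_map]
        congr 1
        · have h1 : List.map (fun j => l.getD (j % l.length) ' ') (List.range l.length)
              = List.map (fun j => l.getD j ' ') (List.range l.length) :=
            List.map_congr_left (fun j hj => by rw [Nat.mod_eq_of_lt (List.mem_range.mp hj)])
          rw [h1, map_range_getD l l.length le_rfl, List.take_length]
        · apply List.map_congr_left
          intro j _
          simp [Function.comp, Nat.add_mod_left]

lemma pvSub_eq_mod (subs : List Char) (hn : subs ≠ []) (j : Nat) :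
    pvSub subs j = subs.getD (j % subs.length) ' ' := by
  unfold pvSub
  split_ifs with h
  · have : subs.length = 1 := by
      have := List.length_pos_iff.mpr hn; omega
    rw [this, Nat.mod_one]
  · rfl

-- fills of Source B = the modulo fill sequence
lemma fills_eq (subs : List Char) (hn : subs ≠ []) (m : Nat) :
    (List.replicate (m / subs.length + 1) subs).flatten.take m
      = (List.range m).map (fun j => pvSub subs j) := by
  have hpos : 0 < subs.length := List.length_pos_iff.mpr hn
  have hb : m ≤ (m / subs.length + 1) * subs.length := by
    have := Nat.div_add_mod m subs.length
    have := Nat.mod_lt m hpos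
    nlinarith
  rw [take_flatten_replicate subs hn _ m hb]
  apply List.map_congr_left
  intro j _
  rw [pvSub_eq_mod subs hn]

-- ===== VERDICT (by name: the statement is the Claim_ definition above) =====
theorem mask_out_spec : Claim_equal_mask_out := by
  intro sentence banned substitutes _ hpre
  unfold Spec_mask_out mask_out mask_out_alt
  set ban := banned.toList
  set subs := substitutes.toList
  set cs := sentence.toList
  have hmem : ∀ c, PySem.Set.contains (PySem.Set.ofList ban) c = decide (c ∈ ban) :=
    fun c => contains_ofList ban c
  have hfold := fold_segs ban (PySem.Set.ofList ban) hmem cs [] []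
  simp only [List.nil_append] at hfold
  cases hs : segsRec ban cs with
  | nil => exact absurd hs (segsRec_ne_nil ban cs)
  | cons h t =>
    rw [hs] at hfold
    simp only [List.headD_cons, List.tail_cons] at hfold
    simp only [hfold]
    have hA : maskA ban subs cs 0
        = h ++ (List.zipWith (fun f s => f :: s)
            ((List.range t.length).map (fun j => pvSub subs j)) t).flatten := by
      rw [maskA_eq_pvSpec, spec_segs, hs]
      simp
    by_cases hm : (h :: t).length - 1 = 0
    · have ht : t = [] := by
        cases t with
        | nil => rfl
        | cons _ _ => simp at hm
      subst ht
      simp only [if_pos hm]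
      rw [hA]
      simp
    · have ht : t ≠ [] := by
        cases t with
        | nil => simp at hm
        | cons _ _ => exact List.cons_ne_nil _ _
      have hsubs : subs ≠ [] := by
        rcases hpre with hne | hno
        · exact hne
        · exfalso
          exact ht (by
            have := segsRec_no_ban ban cs hno
            rw [hs] at this
            exact (List.cons.injEq _ _ _ _).mp this |>.2.symm ▸ rfl)
      simp only [if_neg hm]
      have hlen : (h :: t).length - 1 = t.length := by simp
      rw [hA]
      congr 1
      simp only [List.tail_cons, List.headD_cons, hlen]
      rw [fills_eq subs hsubs t.length]
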